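-- pv_equiv track=rewrite | github.com/feritiro/JSUT_preprocess_parser | teste.py | split_fonemas_jp
-- ===== SOURCE A (Python) =====
-- def split_fonemas_jp(text, fonema_list):
--     fonemas = []
--     i = 0
--     while i < len(text):
--         found = False
--         for fonema in fonema_list:
--             if text[i:i+len(fonema)] == fonema:
--                 fonemas.append(fonema)
--                 i += len(fonema)
--                 found = True
--                 break
--         if not found:
--             fonemas.append(text[i])
--             i += 1
--
--     return fonemas
-- ===== SOURCE B (Python) =====
-- def split_fonemas_jp(text, fonema_list):
--     # Hash the phoneme list once into a rank table (phoneme -> first index in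
--     # the list); at each position try every prefix length up to the longest
--     # phoneme, look it up in O(1), and take the candidate with the smallest
--     # rank -- the same winner A's in-order scan picks.
--     rank = {}
--     for idx, f in enumerate(fonema_list):
--         if f not in rank:
--             rank[f] = idx
--     maxlen = 0
--     for f in fonema_list:
--         maxlen = max(maxlen, len(f))
--     out = []
--     i = 0
--     n = len(text)
--     while i < n:
--         best = None
--         bestlen = 1
--         for L in range(1, min(maxlen, n - i) + 1):
--             r = rank.get(text[i:i + L])
--             if r is not None and (best is None or r < best):
--                 best = r
--                 bestlen = L
--         if best is None:
--             out.append(text[i])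
--             i += 1
--         else:
--             out.append(text[i:i + bestlen])
--             i += bestlen
--     return out
-- ===== Notes on version B (the rewrite author's own statement) =====
-- stated objective: faster
-- what changed: B replaces A's per-position scan of the whole phoneme list by a hash table built once (phoneme -> first list index): at each position it looks up every prefix length up to the longest phoneme in O(1) and keeps the candidate of smallest index, so the per-position cost depends on the maximal phoneme length instead of the list size; Pre_ excludes only the inputs (empty string in the list with nonempty text) on which A loops forever.
import Mathlib
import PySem

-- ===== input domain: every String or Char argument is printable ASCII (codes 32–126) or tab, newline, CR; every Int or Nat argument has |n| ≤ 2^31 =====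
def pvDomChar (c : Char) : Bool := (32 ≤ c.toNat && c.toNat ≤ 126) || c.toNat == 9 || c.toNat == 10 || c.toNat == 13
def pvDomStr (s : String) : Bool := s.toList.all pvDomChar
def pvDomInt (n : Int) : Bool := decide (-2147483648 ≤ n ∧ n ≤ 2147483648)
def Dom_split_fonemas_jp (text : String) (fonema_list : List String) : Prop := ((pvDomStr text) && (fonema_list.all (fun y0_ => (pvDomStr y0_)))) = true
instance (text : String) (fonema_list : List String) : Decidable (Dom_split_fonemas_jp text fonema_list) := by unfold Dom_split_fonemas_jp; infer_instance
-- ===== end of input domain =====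

-- B hashes the phoneme list once into a rank table (phoneme -> first list index) and,
-- at each position, looks up every prefix length up to the longest phoneme, keeping the
-- candidate of smallest rank — the same winner as A's per-position scan of the whole list.

-- ===== PORT A =====
-- while i < len(text): scan fonema_list; first fonema with text[i:i+len(fonema)] == fonema
-- wins, else emit text[i]. Ported as recursion on the remaining suffix with a fuel guard
-- (= text length, enough for any terminating run; A diverges when '' is in the list and
-- text is nonempty — those inputs are excluded by Pre_ below).
def pvGoA (fl : List String) : Nat → List Char → List String
  | 0, _ => []
  | _ + 1, [] => []
  | fuel + 1, c :: rest =>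
    match fl.find? (fun f => (c :: rest).take f.toList.length == f.toList) with
    | some f => f :: pvGoA fl fuel ((c :: rest).drop f.toList.length)
    | none => String.ofList [c] :: pvGoA fl fuel rest

def split_fonemas_jp (text : String) (fonema_list : List String) : List String :=
  pvGoA fonema_list text.toList.length text.toList

-- ===== PORT B =====
-- rank = {}; for idx, f in enumerate(fonema_list): if f not in rank: rank[f] = idx
def pvRank (fl : List String) : PySem.Dict String Int :=
  (PySem.List.enumerate fl 0).foldl
    (fun d p => if d.contains p.2 then d else d.insert p.2 p.1) PySem.Dict.empty

-- maxlen = 0; for f in fonema_list: maxlen = max(maxlen, len(f))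
def pvMaxLen (fl : List String) : Nat :=
  fl.foldl (fun m f => max m f.toList.length) 0

-- the body of Source B's inner "for L" loop: keep (best, bestlen) when r < best (first min wins)
def pvBestStep (b : Option (Int × Nat)) (x : Int × Nat) : Option (Int × Nat) :=
  match b with
  | none => some x
  | some b => if x.1 < b.1 then some x else some b

-- the candidates the inner loop sees: (rank[text[i:i+L]], L) for L in range(1, k+1)
def pvCands (rank : PySem.Dict String Int) (k : Nat) (s : List Char) : List (Int × Nat) :=
  (List.range' 1 k).filterMap
    (fun L => (rank.get? (String.ofList (s.take L))).map (fun r => (r, L)))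

-- the while loop of Source B, as recursion on the remaining suffix (same fuel guard as A's port)
def pvGoB (rank : PySem.Dict String Int) (maxlen : Nat) : Nat → List Char → List String
  | 0, _ => []
  | _ + 1, [] => []
  | fuel + 1, c :: rest =>
    match (pvCands rank (min maxlen (rest.length + 1)) (c :: rest)).foldl pvBestStep none with
    | none => String.ofList [c] :: pvGoB rank maxlen fuel rest
    | some (_, L) => String.ofList ((c :: rest).take L) :: pvGoB rank maxlen fuel ((c :: rest).drop L)

def split_fonemas_jp_alt (text : String) (fonema_list : List String) : List String :=
  pvGoB (pvRank fonema_list) (pvMaxLen fonema_list) text.toList.length text.toList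

-- ===== PRECONDITION & SPEC =====
-- Pre_ excludes only inputs on which A never returns: with '' in fonema_list and a
-- nonempty text, A's while loop matches '' forever (i never advances).
def Pre_split_fonemas_jp (text : String) (fonema_list : List String) : Prop :=
  text = "" ∨ "" ∉ fonema_list
instance (text : String) (fonema_list : List String) : Decidable (Pre_split_fonemas_jp text fonema_list) := by unfold Pre_split_fonemas_jp; infer_instance

def pvWitness_split_fonemas_jp : String × List String := ("kana ga", ["ka", "na", "a", "g"])

def Spec_split_fonemas_jp (text : String) (fonema_list : List String) (out : List String) : Prop := out = split_fonemas_jp_alt text fonema_list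
instance (text : String) (fonema_list : List String) (out : List String) : Decidable (Spec_split_fonemas_jp text fonema_list out) := by unfold Spec_split_fonemas_jp; infer_instance

-- ===== CLAIM (what is proved, stated in full; the proofs are below) =====
def Claim_equal_split_fonemas_jp : Prop := ∀ (text : String) (fonema_list : List String), Dom_split_fonemas_jp text fonema_list → Pre_split_fonemas_jp text fonema_list → Spec_split_fonemas_jp text fonema_list (split_fonemas_jp text fonema_list)

-- ===== LEMMAS AND PROOFS =====

theorem pvRankAux (fl : List String) : ∀ (s : Int) (d : PySem.Dict String Int) (g : String),
    ((PySem.List.enumerate fl s).foldl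
        (fun d p => if d.contains p.2 then d else d.insert p.2 p.1) d).get? g
      = if d.contains g then d.get? g
        else (PySem.List.index? fl g).map (fun n => s + n) := by
  induction fl with
  | nil =>
    intro s d g
    simp only [PySem.List.enumerate_nil, List.foldl_nil, PySem.List.index?_eq_idxOf?, List.idxOf?_nil, Option.map_none]
    by_cases h : d.contains g
    · simp [h]
    · simp [h, PySem.Dict.get?_eq_none_iff_contains]
  | cons f t ih =>
    intro s d g
    rw [PySem.List.enumerate_cons, List.foldl_cons, ih]
    by_cases hgf : g = f
    · subst hgf
      by_cases hdg : d.contains g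
      · simp [hdg]
      · simp only [hdg, if_false, Bool.false_eq_true, if_neg]
        rw [if_pos (by simp [PySem.Dict.contains_insert]),
            PySem.Dict.get?_insert_self, PySem.List.index?_cons_self]
        simp
    · have hidx : PySem.List.index? (f :: t) g = (PySem.List.index? t g).map (· + 1) :=
        PySem.List.index?_cons_of_ne t (Ne.symm hgf)
      by_cases hdf : d.contains f
      · simp only [hdf, if_true, hidx]
        by_cases hdg : d.contains g
        · simp [hdg]
        · simp only [hdg, if_false, Bool.false_eq_true, if_neg, Option.map_map]
          cases PySem.List.index? t g <;> simp <;> omega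
      · simp only [hdf, Bool.false_eq_true, if_neg, if_false]
        rw [PySem.Dict.contains_insert]
        have hbeq : (g == f) = false := by simp [hgf]
        rw [hbeq, Bool.false_or]
        by_cases hdg : d.contains g
        · simp [hdg, PySem.Dict.get?_insert_of_ne _ _ hgf]
        · simp only [hdg, if_false, Bool.false_eq_true, if_neg, hidx, Option.map_map]
          cases PySem.List.index? t g <;> simp <;> omega

theorem pvRank_get? (fl : List String) (g : String) :
    (pvRank fl).get? g = (PySem.List.index? fl g).map (fun n => (n : Int)) := by
  unfold pvRank
  rw [pvRankAux]
  simp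

theorem pvFoldlMax_le_acc (l : List String) : ∀ a : Nat, a ≤ l.foldl (fun m f => max m f.toList.length) a := by
  induction l with
  | nil => intro a; simp
  | cons f t ih => intro a; exact le_trans (le_max_left _ _) (ih _)

theorem pvMaxLen_le (fl : List String) (f : String) (hf : f ∈ fl) :
    f.toList.length ≤ pvMaxLen fl := by
  unfold pvMaxLen
  generalize (0 : Nat) = a
  induction fl generalizing a with
  | nil => cases hf
  | cons x t ih =>
    rcases List.mem_cons.mp hf with h | h
    · subst h
      exact le_trans (le_max_right _ _) (pvFoldlMax_le_acc t _)
    · exact ih h _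

theorem pvBest_keep (l : List (Int × Nat)) (b : Int × Nat) (h : ∀ y ∈ l, ¬ y.1 < b.1) :
    l.foldl pvBestStep (some b) = some b := by
  induction l with
  | nil => rfl
  | cons a t ih =>
    rw [List.foldl_cons]
    have : pvBestStep (some b) a = some b := by
      simp [pvBestStep, h a (List.mem_cons_self)]
    rw [this]
    exact ih (fun y hy => h y (List.mem_cons_of_mem a hy))

theorem pvBest_min (l : List (Int × Nat)) (x : Int × Nat) (hx : x ∈ l)
    (hmin : ∀ y ∈ l, y ≠ x → x.1 < y.1) :
    ∀ acc : Option (Int × Nat), (acc = none ∨ ∃ b, x.1 < b.1 ∧ acc = some b) →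
      l.foldl pvBestStep acc = some x := by
  induction l with
  | nil => cases hx
  | cons a t ih =>
    intro acc hacc
    rw [List.foldl_cons]
    by_cases hax : a = x
    · subst hax
      have hstep : pvBestStep acc a = some a := by
        rcases hacc with h | ⟨b, hb, h⟩
        · subst h; rfl
        · subst h; simp [pvBestStep, hb]
      rw [hstep]
      apply pvBest_keep
      intro y hy
      by_cases hya : y = a
      · subst hya; omega
      · have := hmin y (List.mem_cons_of_mem a hy) hya; omega
    · have hxa : x.1 < a.1 := hmin a (List.mem_cons_self) hax
      have hxt : x ∈ t := (List.mem_cons.mp hx).resolve_left (fun h => hax h.symm)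
      apply ih hxt (fun y hy => hmin y (List.mem_cons_of_mem a hy))
      rcases hacc with h | ⟨b, hb, h⟩ <;> subst h
      · right; exact ⟨a, hxa, rfl⟩
      · simp only [pvBestStep]
        split_ifs with hcmp
        · right; exact ⟨a, hxa, rfl⟩
        · right; exact ⟨b, hb, rfl⟩

theorem pvMem_cands (rank : PySem.Dict String Int) (k : Nat) (s : List Char) (y : Int × Nat) :
    y ∈ pvCands rank k s ↔
      1 ≤ y.2 ∧ y.2 ≤ k ∧ rank.get? (String.ofList (s.take y.2)) = some y.1 := by
  unfold pvCands
  rw [List.mem_filterMap]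
  constructor
  · rintro ⟨L, hL, hf⟩
    rw [List.mem_range'_1] at hL
    rcases Option.map_eq_some_iff.mp hf with ⟨r, hr, hry⟩
    cases hry
    exact ⟨hL.1, by omega, hr⟩
  · rintro ⟨h1, h2, hr⟩
    exact ⟨y.2, List.mem_range'_1.mpr ⟨h1, by omega⟩, by rw [hr]; rfl⟩

-- a candidate's key is a member of fl satisfying A's predicate

theorem pvCand_key (fl : List String) (s : List Char) (L : Nat) (r : Int) (hL : L ≤ s.length)
    (hr : (pvRank fl).get? (String.ofList (s.take L)) = some r) :
    ∃ rn : Nat, r = (rn : Int) ∧ PySem.List.index? fl (String.ofList (s.take L)) = some rn ∧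
      ((String.ofList (s.take L)).toList.length = L) := by
  rw [pvRank_get?] at hr
  cases hidx : PySem.List.index? fl (String.ofList (s.take L)) with
  | none => rw [hidx] at hr; simp at hr
  | some rn =>
    rw [hidx] at hr
    simp at hr
    exact ⟨rn, by omega, rfl, by simp [Nat.min_eq_left hL]⟩

theorem pvPred_of_key (fl : List String) (s : List Char) (L : Nat) (hL : L ≤ s.length) :
    ((fun f => s.take f.toList.length == f.toList) (String.ofList (s.take L))) = true := by
  simp [Nat.min_eq_left hL]

theorem pvStep_none (fl : List String) (s : List Char)
    (hfind : fl.find? (fun f => s.take f.toList.length == f.toList) = none) :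
    pvCands (pvRank fl) (min (pvMaxLen fl) s.length) s = [] := by
  rw [List.eq_nil_iff_forall_not_mem]
  intro y hy
  rcases (pvMem_cands _ _ _ _).mp hy with ⟨h1, h2, hr⟩
  have hL : y.2 ≤ s.length := le_trans h2 (min_le_right _ _)
  rcases pvCand_key fl s y.2 y.1 hL hr with ⟨rn, _, hidx, _⟩
  have hmem : String.ofList (s.take y.2) ∈ fl :=
    (PySem.List.index?_isSome_iff _ _).mp (by rw [hidx]; rfl) -- membership
  have := List.find?_eq_none.mp hfind _ hmem
  exact this (pvPred_of_key fl s y.2 hL)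

theorem pvStep_some (fl : List String) (h0 : "" ∉ fl) (s : List Char) (f : String)
    (hfind : fl.find? (fun f => s.take f.toList.length == f.toList) = some f) :
    ∃ r, (pvCands (pvRank fl) (min (pvMaxLen fl) s.length) s).foldl pvBestStep none
          = some (r, f.toList.length) := by
  rcases List.find?_eq_some_iff_getElem.mp hfind with ⟨hpf, j, hj, hgj, hjmin⟩
  have htake : s.take f.toList.length = f.toList := by
    simpa using hpf
  have hLle : f.toList.length ≤ s.length := by
    have := congrArg List.length htake
    simp only [List.length_take] at this
    omega
  have hfmem : f ∈ fl := hgj ▸ List.getElem_mem hj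
  have hLpos : 1 ≤ f.toList.length := by
    rcases Nat.eq_zero_or_pos f.toList.length with h | h
    · exfalso
      apply h0
      have hnil : f.toList = [] := List.eq_nil_of_length_eq_zero h
      have : f = "" := by
        apply String.toList_inj.mp
        simp [hnil]
      exact this ▸ hfmem
    · exact h
  -- index? fl f = some j
  have hidxf : PySem.List.index? fl f = some j := by
    rw [PySem.List.index?_eq_some_iff]
    refine ⟨fl.take j, fl.drop (j + 1), ?_, by simp [Nat.min_eq_left (le_of_lt hj)], ?_⟩
    · rw [← hgj, ← List.drop_eq_getElem_cons hj, List.take_append_drop]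
    · intro hmem
      rcases List.mem_iff_getElem.mp hmem with ⟨i, hi, hie⟩
      have hilt : i < j := by
        have := hi; simp only [List.length_take] at this; omega
      have hfe : fl[i]'(by omega) = f := by
        rw [← hie]; exact (List.getElem_take).symm
      have hni := hjmin i hilt
      rw [hfe] at hni
      simp only [hpf, Bool.not_true] at hni
      cases hni
  -- the winning candidate
  set x : Int × Nat := ((j : Int), f.toList.length) with hx
  have hxmem : x ∈ pvCands (pvRank fl) (min (pvMaxLen fl) s.length) s := by
    rw [pvMem_cands]
    refine ⟨hLpos, le_min (pvMaxLen_le fl f hfmem) hLle, ?_⟩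
    rw [htake, String.ofList_toList, pvRank_get?, hidxf]
    rfl
  have hxmin : ∀ y ∈ pvCands (pvRank fl) (min (pvMaxLen fl) s.length) s, y ≠ x → x.1 < y.1 := by
    intro y hy hne
    rcases (pvMem_cands _ _ _ _).mp hy with ⟨h1, h2, hr⟩
    have hyL : y.2 ≤ s.length := le_trans h2 (min_le_right _ _)
    rcases pvCand_key fl s y.2 y.1 hyL hr with ⟨rn, hcast, hidxy, hglen⟩
    rcases PySem.List.getElem_of_index?_eq_some hidxy with ⟨hrn, hgrn, hrnmin⟩
    have hpg : ((fun f => s.take f.toList.length == f.toList) (String.ofList (s.take y.2))) = true :=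
      pvPred_of_key fl s y.2 hyL
    have hjle : j ≤ rn := by
      by_contra hlt
      push_neg at hlt
      exact (by simpa [hgrn, hpg] using hjmin rn hlt)
    have hjne : j ≠ rn := by
      intro he
      apply hne
      have hgf : String.ofList (s.take y.2) = f := by
        rw [← hgj, ← hgrn]
        congr 1
        omega
      have : y.2 = f.toList.length := by
        rw [← hglen, hgf]
      rw [hx, ← this, he, ← hcast]
    rw [hx, hcast]
    show (j : Int) < (rn : Int)
    exact_mod_cast lt_of_le_of_ne hjle hjne
  exact ⟨(j : Int), pvBest_min _ x hxmem hxmin none (Or.inl rfl)⟩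

theorem pvGoEq (fl : List String) (h0 : "" ∉ fl) (fuel : Nat) (s : List Char) :
    pvGoA fl fuel s = pvGoB (pvRank fl) (pvMaxLen fl) fuel s := by
  induction fuel generalizing s with
  | zero => rfl
  | succ fuel ih =>
    cases s with
    | nil => rfl
    | cons c rest =>
      have hslen : (c :: rest).length = rest.length + 1 := List.length_cons
      cases hfind : fl.find? (fun f => (c :: rest).take f.toList.length == f.toList) with
      | none =>
        have hc : pvCands (pvRank fl) (min (pvMaxLen fl) (rest.length + 1)) (c :: rest) = [] := by
          have := pvStep_none fl (c :: rest) hfind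
          rwa [hslen] at this
        simp only [pvGoA, pvGoB, hfind, hc, List.foldl_nil, ih]
      | some f =>
        rcases pvStep_some fl h0 (c :: rest) f hfind with ⟨r, hbest⟩
        rw [hslen] at hbest
        have hp := List.find?_some hfind
        have htake : (c :: rest).take f.toList.length = f.toList := by
          simpa using hp
        simp only [pvGoA, pvGoB, hfind, hbest, htake, String.ofList_toList, ih]

-- ===== VERDICT (by name: the statement is the Claim_ definition above) =====
theorem split_fonemas_jp_spec : Claim_equal_split_fonemas_jp := by
  intro text fl _ hpre
  unfold Spec_split_fonemas_jp split_fonemas_jp split_fonemas_jp_alt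
  rcases hpre with h | h
  · subst h; rfl
  · exact pvGoEq fl h _ _
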